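-- pv_equiv track=rewrite | github.com/allenwu5/python-effective | src/ch2_function/method16_yield.py | index_token
-- ===== SOURCE A (Python) =====
-- def index_token(lines):
--     offset = 0
--     for line in lines:
--         if line:
--             yield offset
--         for letter in line:
--             offset += 1
--             if letter == ' ':
--                 yield offset
-- ===== SOURCE B (Python) =====
-- def index_token(lines):
--     offset = 0
--     for line in lines:
--         if line:
--             yield offset
--         pos = line.find(' ')
--         while pos != -1:
--             yield offset + pos + 1
--             pos = line.find(' ', pos + 1)
--         offset += len(line)
-- ===== Notes on version B (the rewrite author's own statement) =====
-- stated objective: alternative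
-- what changed: Replaces A's per-character counter scan (offset incremented for every letter) by a per-line base offset with str.find jumping directly between space positions and a single offset += len(line) per line.
import Mathlib
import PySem

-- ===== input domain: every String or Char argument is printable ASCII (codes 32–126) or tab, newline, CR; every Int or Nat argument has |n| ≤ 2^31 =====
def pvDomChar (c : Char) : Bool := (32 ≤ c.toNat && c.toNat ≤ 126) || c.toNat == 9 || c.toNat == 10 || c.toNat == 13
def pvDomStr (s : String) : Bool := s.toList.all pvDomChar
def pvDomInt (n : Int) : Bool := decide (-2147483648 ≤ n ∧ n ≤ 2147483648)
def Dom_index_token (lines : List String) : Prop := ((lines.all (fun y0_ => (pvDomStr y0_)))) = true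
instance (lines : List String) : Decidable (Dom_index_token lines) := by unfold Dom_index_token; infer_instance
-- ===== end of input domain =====

-- B replaces A's per-character counter scan by a per-line base offset plus
-- find-jumping between space positions (objective: alternative decomposition).
-- Both Pythons are generators; equivalence is about the list of yielded values.

-- ===== PORT A =====
-- inner loop of A: 'for letter in line: offset += 1; if letter == ' ': yield offset'
def indexTokenLineA (s : Int × List Int) (cs : List Char) : Int × List Int :=
  cs.foldl (fun (t : Int × List Int) letter =>
    let offset := t.1 + 1
    (offset, if letter = ' ' then t.2 ++ [offset] else t.2)) s

def index_token (lines : List String) : List Int :=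
  (lines.foldl (fun (s : Int × List Int) line =>
    let s' : Int × List Int := (s.1, if line.toList ≠ [] then s.2 ++ [s.1] else s.2)
    indexTokenLineA s' line.toList) ((0 : Int), ([] : List Int))).2

-- ===== PORT B =====
-- port of Python's line.find(' ', start): first index ≥ start holding ' ', else -1
def findIdxSpace : List Char → Option Nat
  | [] => none
  | c :: cs => if c = ' ' then some 0 else (findIdxSpace cs).map (· + 1)

def findSpaceFrom (cs : List Char) (start : Nat) : Int :=
  match findIdxSpace (cs.drop start) with
  | none => -1
  | some j => (start : Int) + j

-- the 'while pos != -1' loop of B (fuel only makes the loop structurally total)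
def indexTokenLoopB : Nat → List Char → Int → Int → List Int → List Int
  | 0, _, _, _, acc => acc
  | fuel + 1, cs, offset, pos, acc =>
    if pos = -1 then acc
    else indexTokenLoopB fuel cs offset (findSpaceFrom cs (pos.toNat + 1))
      (acc ++ [offset + pos + 1])

def index_token_alt (lines : List String) : List Int :=
  (lines.foldl (fun (s : Int × List Int) line =>
    let cs := line.toList
    let acc := if cs ≠ [] then s.2 ++ [s.1] else s.2
    (s.1 + cs.length,
      indexTokenLoopB (cs.length + 1) cs s.1 (findSpaceFrom cs 0) acc))
    ((0 : Int), ([] : List Int))).2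

-- ===== PRECONDITION & SPEC =====
def Spec_index_token (lines : List String) (out : List Int) : Prop := out = index_token_alt lines
instance (lines : List String) (out : List Int) : Decidable (Spec_index_token lines out) := by unfold Spec_index_token; infer_instance

-- ===== CLAIM (what is proved, stated in full; the proofs are below) =====
def Claim_equal_index_token : Prop := ∀ (lines : List String), Dom_index_token lines → Spec_index_token lines (index_token lines)

-- ===== LEMMAS AND PROOFS =====

-- proof-side specification: the offsets yielded for one line that starts at offset `b`
def spOut (b : Int) : List Char → List Int
  | [] => []
  | c :: cs => if c = ' ' then (b + 1) :: spOut (b + 1) cs else spOut (b + 1) cs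

theorem indexTokenLineA_eq (cs : List Char) : ∀ (off : Int) (acc : List Int),
    indexTokenLineA (off, acc) cs = (off + cs.length, acc ++ spOut off cs) := by
  induction cs with
  | nil => intro off acc; simp [indexTokenLineA, spOut]
  | cons c cs ih =>
    intro off acc
    by_cases h : c = ' '
    · have step : indexTokenLineA (off, acc) (c :: cs)
          = indexTokenLineA (off + 1, acc ++ [off + 1]) cs := by
        simp [indexTokenLineA, h]
      rw [step, ih]
      have e : off + 1 + (cs.length : Int) = off + ((cs.length : Int) + 1) := by ring
      simp [spOut, h, e]
    · have step : indexTokenLineA (off, acc) (c :: cs)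
          = indexTokenLineA (off + 1, acc) cs := by
        simp [indexTokenLineA, h]
      rw [step, ih]
      have e : off + 1 + (cs.length : Int) = off + ((cs.length : Int) + 1) := by ring
      simp [spOut, h, e]

theorem findIdxSpace_lt {cs : List Char} {j : Nat} (h : findIdxSpace cs = some j) :
    j < cs.length := by
  induction cs generalizing j with
  | nil => simp [findIdxSpace] at h
  | cons c cs ih =>
    by_cases hc : c = ' '
    · simp [findIdxSpace, hc] at h; simp; omega
    · simp [findIdxSpace, hc] at h
      obtain ⟨k, hk, rfl⟩ := h
      have := ih hk; simp; omega

theorem spOut_of_findIdxSpace_none {cs : List Char} (h : findIdxSpace cs = none) :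
    ∀ b : Int, spOut b cs = [] := by
  induction cs with
  | nil => intro b; simp [spOut]
  | cons c cs ih =>
    intro b
    by_cases hc : c = ' '
    · simp [findIdxSpace, hc] at h
    · simp [findIdxSpace, hc] at h
      simp [spOut, hc, ih h]

theorem spOut_of_findIdxSpace_some {cs : List Char} {j : Nat} (h : findIdxSpace cs = some j) :
    ∀ b : Int, spOut b cs = (b + j + 1) :: spOut (b + j + 1) (cs.drop (j + 1)) := by
  induction cs generalizing j with
  | nil => simp [findIdxSpace] at h
  | cons c cs ih =>
    intro b
    by_cases hc : c = ' '
    · simp [findIdxSpace, hc] at h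
      subst h; simp [spOut, hc]
    · simp [findIdxSpace, hc] at h
      obtain ⟨k, hk, rfl⟩ := h
      have e : b + 1 + (k : Int) + 1 = b + (((k + 1 : Nat) : Int)) + 1 := by push_cast; ring
      simp only [spOut, if_neg hc, ih hk (b + 1), List.drop_succ_cons]
      rw [e]

theorem indexTokenLoopB_eq (fuel : Nat) : ∀ (cs : List Char) (start : Nat)
    (off : Int) (acc : List Int), cs.length - start + 1 ≤ fuel →
    indexTokenLoopB fuel cs off (findSpaceFrom cs start) acc
      = acc ++ spOut (off + start) (cs.drop start) := by
  induction fuel with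
  | zero => intro _ _ _ _ h; omega
  | succ fuel ih =>
    intro cs start off acc hf
    rcases hnone : findIdxSpace (cs.drop start) with _ | j
    · simp [indexTokenLoopB, findSpaceFrom, hnone, spOut_of_findIdxSpace_none hnone]
    · have hj : j < cs.length - start := by
        have h1 := findIdxSpace_lt hnone
        have h2 : (cs.drop start).length = cs.length - start := by simp
        omega
      have hpos : findSpaceFrom cs start = (start : Int) + j := by
        simp [findSpaceFrom, hnone]
      have hne : ((start : Int) + j) ≠ -1 := by omega
      have htn : (((start : Int) + j).toNat + 1) = start + j + 1 := by omega
      rw [hpos]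
      simp only [indexTokenLoopB, if_neg hne, htn]
      rw [ih cs (start + j + 1) off (acc ++ [off + ((start : Int) + j) + 1]) (by omega)]
      rw [spOut_of_findIdxSpace_some hnone (off + (start : Int))]
      have hdd : (cs.drop start).drop (j + 1) = cs.drop (start + j + 1) := by
        rw [List.drop_drop]
        congr 1
        try omega
      rw [hdd]
      have e1 : off + ((start : Int) + j) + 1 = off + (start : Int) + j + 1 := by ring
      have e2 : off + ((start + j + 1 : Nat) : Int) = off + (start : Int) + j + 1 := by
        push_cast; ring
      rw [e1, e2]
      simp [List.append_assoc]

theorem index_token_fold_eq (lines : List String) : ∀ (s : Int × List Int),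
    lines.foldl (fun (s : Int × List Int) line =>
      let s' : Int × List Int := (s.1, if line.toList ≠ [] then s.2 ++ [s.1] else s.2)
      indexTokenLineA s' line.toList) s
    = lines.foldl (fun (s : Int × List Int) line =>
      let cs := line.toList
      let acc := if cs ≠ [] then s.2 ++ [s.1] else s.2
      (s.1 + cs.length,
        indexTokenLoopB (cs.length + 1) cs s.1 (findSpaceFrom cs 0) acc)) s := by
  induction lines with
  | nil => intro s; rfl
  | cons line rest ih =>
    intro s
    simp only [List.foldl_cons]
    rw [ih]
    have hstep :
        indexTokenLineA (s.1, if line.toList ≠ [] then s.2 ++ [s.1] else s.2)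
          line.toList
        = (s.1 + (line.toList.length : Int),
           indexTokenLoopB (line.toList.length + 1) line.toList s.1
             (findSpaceFrom line.toList 0)
             (if line.toList ≠ [] then s.2 ++ [s.1] else s.2)) := by
      rw [indexTokenLineA_eq]
      rw [indexTokenLoopB_eq (line.toList.length + 1) line.toList 0 s.1 _ (by omega)]
      simp
    exact congrArg
      (fun t => List.foldl (fun (s : Int × List Int) line =>
        let cs := line.toList
        let acc := if cs ≠ [] then s.2 ++ [s.1] else s.2
        (s.1 + cs.length,
          indexTokenLoopB (cs.length + 1) cs s.1 (findSpaceFrom cs 0) acc)) t rest)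
      hstep

-- ===== VERDICT (by name: the statement is the Claim_ definition above) =====
theorem index_token_spec : Claim_equal_index_token := by
  intro lines _
  unfold Spec_index_token index_token index_token_alt
  rw [index_token_fold_eq]
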